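-- pv_equiv track=rewrite | github.com/karuna131/PYTHON_PROJECTS | Python_webScraping/imdb.py | group_by_decade
-- ===== SOURCE A (Python) =====
-- def group_by_decade(movies):
--     moviedec={}
--     list2=[]
--     for index in movies:
--         mod=index%10
--         decade=index-mod
--         if decade not in list2:
--             list2.append(decade)
--     list2.sort()
--     for i in list2:
--         moviedec[i]=[]
--     for i in moviedec:
--         dec10 = i+9
--         for x in movies:
--             if x<=dec10 and x>=i:
--                 for v in movies[x]:
--                     moviedec[i].append(v)
--     return moviedec
-- ===== SOURCE B (Python) =====
-- def group_by_decade(movies):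
--     buckets = {}
--     for year, titles in movies.items():
--         d = year - year % 10
--         if d in buckets:
--             buckets[d].extend(titles)
--         else:
--             buckets[d] = list(titles)
--     return {d: buckets[d] for d in sorted(buckets)}
-- ===== Notes on version B (the rewrite author's own statement) =====
-- stated objective: faster
-- what changed: Replaces A's per-decade rescans of the whole dict (and its membership-list dedup) by one pass that drops each entry into its decade bucket, then emits the buckets in sorted-key order.
import Mathlib
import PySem

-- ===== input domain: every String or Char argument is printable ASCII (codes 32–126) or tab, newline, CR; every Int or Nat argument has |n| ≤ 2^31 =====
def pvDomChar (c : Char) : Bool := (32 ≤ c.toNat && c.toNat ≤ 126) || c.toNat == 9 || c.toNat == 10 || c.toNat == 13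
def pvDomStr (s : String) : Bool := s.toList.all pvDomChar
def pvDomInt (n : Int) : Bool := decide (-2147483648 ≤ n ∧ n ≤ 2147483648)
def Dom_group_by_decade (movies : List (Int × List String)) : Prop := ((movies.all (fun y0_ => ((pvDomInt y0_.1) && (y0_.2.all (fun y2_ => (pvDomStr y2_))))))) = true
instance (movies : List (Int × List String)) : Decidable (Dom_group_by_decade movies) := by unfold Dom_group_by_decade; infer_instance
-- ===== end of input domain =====

-- B replaces A's per-decade rescan of the whole dict by a single bucketing pass plus a sort of the
-- decade keys (asymptotically faster); return-value equivalence on dict inputs (nodup keys).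

-- ===== PORT A =====
def group_by_decade (movies : List (Int × List String)) : List (Int × List String) :=
  let mv : PySem.Dict Int (List String) := PySem.Dict.ofList movies
  let list2 : List Int :=
    mv.keys.foldl (fun l index =>
      let md := PySem.Int.mod index 10
      let decade := index - md
      if decade ∈ l then l else l ++ [decade]) []
  let list2s := PySem.List.sorted list2 (fun x => x) false
  let moviedec : PySem.Dict Int (List String) :=
    list2s.foldl (fun d i => d.insert i []) PySem.Dict.empty
  let moviedec2 :=
    moviedec.keys.foldl (fun d i =>
      let dec10 := i + 9
      mv.keys.foldl (fun d x =>
        if x ≤ dec10 ∧ x ≥ i then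
          (mv.getD x []).foldl (fun d v => d.modify i [] (fun l => l ++ [v])) d
        else d) d) moviedec
  moviedec2.items

-- ===== PORT B =====
def group_by_decade_alt (movies : List (Int × List String)) : List (Int × List String) :=
  let buckets : PySem.Dict Int (List String) :=
    movies.foldl (fun b p =>
      let d := p.1 - PySem.Int.mod p.1 10
      if b.contains d then b.modify d [] (fun l => l ++ p.2)
      else b.insert d p.2) PySem.Dict.empty
  (PySem.List.sorted buckets.keys (fun x => x) false).map (fun d => (d, buckets.getD d []))

-- ===== PRECONDITION & SPEC =====
-- Pre_ excludes association lists with duplicate keys: they do not represent a Python dict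
-- (the argument type of group_by_decade), so no behaviour of A is specified on them.
def Pre_group_by_decade (movies : List (Int × List String)) : Prop :=
  (movies.map Prod.fst).Nodup
instance (movies : List (Int × List String)) : Decidable (Pre_group_by_decade movies) := by
  unfold Pre_group_by_decade; infer_instance

def pvWitness_group_by_decade : (List (Int × List String)) :=
  [(1995, ["Heat"]), (2003, ["Oldboy"]), (1999, ["The Matrix"])]

def Spec_group_by_decade (movies : List (Int × List String)) (out : List (Int × List String)) : Prop := out = group_by_decade_alt movies
instance (movies : List (Int × List String)) (out : List (Int × List String)) : Decidable (Spec_group_by_decade movies out) := by unfold Spec_group_by_decade; infer_instance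

-- ===== CLAIM (what is proved, stated in full; the proofs are below) =====
def Claim_equal_group_by_decade : Prop := ∀ (movies : List (Int × List String)), Dom_group_by_decade movies → Pre_group_by_decade movies → Spec_group_by_decade movies (group_by_decade movies)

-- ===== LEMMAS AND PROOFS =====

def pvDec (y : Int) : Int := y - PySem.Int.mod y 10

-- A's membership-list accumulation is Set.add
theorem pv_add_eq (l : List Int) (x : Int) :
    (if x ∈ l then l else l ++ [x]) = PySem.Set.add l x := by
  by_cases h : x ∈ l <;> simp [PySem.Set.add, h]

-- dict built from a nodup association list
theorem pv_ofList_items (movies : List (Int × List String))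
    (h : (movies.map Prod.fst).Nodup) :
    (PySem.Dict.ofList movies).items = movies := by
  have := PySem.Dict.items_foldl_insert_fresh (l := movies) (k := Prod.fst) (v := Prod.snd)
    (d := PySem.Dict.empty) (by intro a _; simp [PySem.Dict.contains_empty]) h
  simpa [PySem.Dict.ofList, PySem.Dict.update, PySem.Dict.empty] using this

theorem pv_ofList_keys (movies : List (Int × List String))
    (h : (movies.map Prod.fst).Nodup) :
    (PySem.Dict.ofList movies).keys = movies.map Prod.fst := by
  simp [PySem.Dict.keys, pv_ofList_items movies h]

theorem pv_ofList_getD (movies : List (Int × List String))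
    (h : (movies.map Prod.fst).Nodup) {p : Int × List String} (hp : p ∈ movies) :
    (PySem.Dict.ofList movies).getD p.1 [] = p.2 := by
  apply PySem.Dict.getD_of_mem_items
  · rw [pv_ofList_items movies h]; exact hp
  · rw [pv_ofList_keys movies h]; exact h

-- B's one-pass loop
theorem pv_bstep_keys (movies : List (Int × List String)) (b : PySem.Dict Int (List String)) :
    (movies.foldl (fun b p =>
        if b.contains (pvDec p.1) then b.modify (pvDec p.1) [] (fun l => l ++ p.2)
        else b.insert (pvDec p.1) p.2) b).keys
      = PySem.Set.update b.keys (movies.map (fun p => pvDec p.1)) := by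
  induction movies generalizing b with
  | nil => simp [PySem.Set.update]
  | cons p t ih =>
    simp only [List.foldl_cons, List.map_cons, PySem.Set.update, List.foldl_cons]
    rw [← PySem.Set.update]
    rw [ih]
    congr 1
    by_cases h : b.contains (pvDec p.1)
    · rw [if_pos h, PySem.Dict.keys_modify, PySem.Dict.keys_insert_of_contains _ _ h,
        PySem.Set.add, if_pos]
      simp only [PySem.Set.contains, List.contains_iff_mem]
      exact (PySem.Dict.contains_iff_mem_keys b _).mp h
    · rw [if_neg h, PySem.Dict.keys_insert_of_not_contains _ _ (by simpa using h),
        PySem.Set.add, if_neg]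
      simp only [PySem.Set.contains, List.contains_iff_mem]
      intro hm
      exact h ((PySem.Dict.contains_iff_mem_keys b _).mpr hm)

theorem pv_bstep_getD (movies : List (Int × List String)) (b : PySem.Dict Int (List String)) (c : Int) :
    (movies.foldl (fun b p =>
        if b.contains (pvDec p.1) then b.modify (pvDec p.1) [] (fun l => l ++ p.2)
        else b.insert (pvDec p.1) p.2) b).getD c []
      = b.getD c [] ++ (movies.filter (fun p => decide (pvDec p.1 = c))).flatMap Prod.snd := by
  induction movies generalizing b with
  | nil => simp
  | cons p t ih =>
    simp only [List.foldl_cons, List.filter_cons]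
    rw [ih]
    by_cases hc : pvDec p.1 = c
    · simp only [hc, decide_true, if_pos]
      have hstep : (if b.contains c then b.modify c [] (fun l => l ++ p.2)
          else b.insert c p.2).getD c [] = b.getD c [] ++ p.2 := by
        by_cases h : b.contains c
        · rw [if_pos h, PySem.Dict.getD_modify, if_pos rfl]
        · rw [if_neg (by simpa using h), PySem.Dict.getD_insert, if_pos rfl,
            PySem.Dict.getD_of_not_contains _ _ (by simpa using h)]
          simp
      rw [hstep, List.flatMap_cons, List.append_assoc]
    · have hb : decide (pvDec p.1 = c) = false := by simpa using hc
      simp only [hb, if_neg Bool.false_ne_true]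
      have hstep : (if b.contains (pvDec p.1) then b.modify (pvDec p.1) [] (fun l => l ++ p.2)
          else b.insert (pvDec p.1) p.2).getD c [] = b.getD c [] := by
        by_cases h : b.contains (pvDec p.1)
        · rw [if_pos h, PySem.Dict.getD_modify, if_neg (by exact fun hh => hc hh.symm)]
        · rw [if_neg (by simpa using h), PySem.Dict.getD_insert, if_neg (by exact fun hh => hc hh.symm)]
      rw [hstep]

-- A's innermost append loop
theorem pv_inner_getD (vs : List String) (d : PySem.Dict Int (List String)) (i c : Int) :
    (vs.foldl (fun d v => d.modify i [] (fun l => l ++ [v])) d).getD c []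
      = d.getD c [] ++ (if c = i then vs else []) := by
  induction vs generalizing d with
  | nil => simp
  | cons v t ih =>
    simp only [List.foldl_cons]
    rw [ih, PySem.Dict.getD_modify]
    by_cases h : c = i
    · subst h; simp
    · simp [h]

theorem pv_inner_keys (vs : List String) (d : PySem.Dict Int (List String)) (i : Int)
    (h : i ∈ d.keys) :
    (vs.foldl (fun d v => d.modify i [] (fun l => l ++ [v])) d).keys = d.keys := by
  induction vs generalizing d with
  | nil => rfl
  | cons v t ih =>
    simp only [List.foldl_cons]
    have hk : (d.modify i [] (fun l => l ++ [v])).keys = d.keys := by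
      rw [PySem.Dict.keys_modify,
        PySem.Dict.keys_insert_of_contains _ _ ((PySem.Dict.contains_iff_mem_keys d i).mpr h)]
    rw [ih _ (by rw [hk]; exact h), hk]

-- A's middle loop over the year keys (g x stands for mv.getD x [])
theorem pv_mid_getD (xs : List Int) (g : Int → List String)
    (d : PySem.Dict Int (List String)) (i c : Int) :
    (xs.foldl (fun d x => if x ≤ i + 9 ∧ x ≥ i then
        (g x).foldl (fun d v => d.modify i [] (fun l => l ++ [v])) d else d) d).getD c []
      = d.getD c [] ++ (if c = i then xs.flatMap (fun x => if x ≤ i + 9 ∧ x ≥ i then g x else []) else []) := by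
  induction xs generalizing d with
  | nil => simp
  | cons x t ih =>
    simp only [List.foldl_cons, List.flatMap_cons]
    rw [ih]
    by_cases hx : x ≤ i + 9 ∧ x ≥ i
    · rw [if_pos hx, pv_inner_getD]
      by_cases h : c = i
      · simp [h, hx, List.append_assoc]
      · simp [h]
    · rw [if_neg hx]
      by_cases h : c = i
      · simp [h, hx]
      · simp [h]

theorem pv_mid_keys (xs : List Int) (g : Int → List String)
    (d : PySem.Dict Int (List String)) (i : Int) (h : i ∈ d.keys) :
    (xs.foldl (fun d x => if x ≤ i + 9 ∧ x ≥ i then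
        (g x).foldl (fun d v => d.modify i [] (fun l => l ++ [v])) d else d) d).keys = d.keys := by
  induction xs generalizing d with
  | nil => rfl
  | cons x t ih =>
    simp only [List.foldl_cons]
    by_cases hx : x ≤ i + 9 ∧ x ≥ i
    · rw [if_pos hx]
      have hk := pv_inner_keys (g x) d i h
      rw [ih _ (by rw [hk]; exact h), hk]
    · rw [if_neg hx, ih _ h]

-- A's outer loop over the (distinct) decades
theorem pv_outer_getD (S : List Int) (xs : List Int) (g : Int → List String)
    (d : PySem.Dict Int (List String)) (hS : S.Nodup) (hK : ∀ i ∈ S, i ∈ d.keys) (c : Int) :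
    (S.foldl (fun d i => xs.foldl (fun d x => if x ≤ i + 9 ∧ x ≥ i then
        (g x).foldl (fun d v => d.modify i [] (fun l => l ++ [v])) d else d) d) d).getD c []
      = d.getD c [] ++ (if c ∈ S then xs.flatMap (fun x => if x ≤ c + 9 ∧ x ≥ c then g x else []) else []) := by
  induction S generalizing d with
  | nil => simp
  | cons i t ih =>
    simp only [List.foldl_cons]
    have hk := pv_mid_keys xs g d i (hK i (by simp))
    rw [ih _ hS.of_cons (by intro j hj; rw [hk]; exact hK j (by simp [hj])), pv_mid_getD]
    by_cases h : c = i
    · subst h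
      have hct : c ∉ t := (List.nodup_cons.mp hS).1
      simp [hct]
    · by_cases hct : c ∈ t
      · simp [h, hct]
      · simp [h, hct]

theorem pv_outer_keys (S : List Int) (xs : List Int) (g : Int → List String)
    (d : PySem.Dict Int (List String)) (hK : ∀ i ∈ S, i ∈ d.keys) :
    (S.foldl (fun d i => xs.foldl (fun d x => if x ≤ i + 9 ∧ x ≥ i then
        (g x).foldl (fun d v => d.modify i [] (fun l => l ++ [v])) d else d) d) d).keys = d.keys := by
  induction S generalizing d with
  | nil => rfl
  | cons i t ih =>
    simp only [List.foldl_cons]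
    have hk := pv_mid_keys xs g d i (hK i (by simp))
    rw [ih _ (by intro j hj; rw [hk]; exact hK j (by simp [hj])), hk]

theorem pv_if_flatMap {α β : Type} (l : List α) (q : α → Prop) [DecidablePred q] (g : α → List β) :
    l.flatMap (fun x => if q x then g x else []) = (l.filter (fun x => decide (q x))).flatMap g := by
  induction l with
  | nil => rfl
  | cons a t ih => by_cases h : q a <;> simp [h, ih]

theorem pv_dec_mod (k y : Int) (h : k = pvDec y) (x : Int) :
    (x ≤ k + 9 ∧ x ≥ k) ↔ pvDec x = k := by
  have h10 : (0:Int) < 10 := by norm_num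
  simp only [pvDec, PySem.Int.mod_eq_emod_of_pos h10] at *
  omega

-- ===== VERDICT (by name: the statement is the Claim_ definition above) =====
theorem group_by_decade_spec : Claim_equal_group_by_decade := by
  intro movies _ hpre
  unfold Spec_group_by_decade group_by_decade group_by_decade_alt
  simp only [show ∀ y : Int, y - PySem.Int.mod y 10 = pvDec y from fun _ => rfl]
  have hK : (PySem.Dict.ofList movies).keys = movies.map Prod.fst := pv_ofList_keys movies hpre
  -- the deduplicated decade list is Set.ofList of the mapped decades
  have hlist2 : List.foldl (fun l index => if pvDec index ∈ l then l else l ++ [pvDec index]) []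
      (PySem.Dict.ofList movies).keys = PySem.Set.ofList (movies.map (fun p => pvDec p.1)) := by
    rw [hK, PySem.Set.ofList_eq_foldl, List.foldl_map, List.foldl_map]
    exact PySem.List.foldl_congr_mem _ _ _ _ (fun acc p _ => pv_add_eq acc (pvDec p.1))
  rw [hlist2]
  have hbk : (List.foldl (fun b p =>
      if b.contains (pvDec p.1) then b.modify (pvDec p.1) [] (fun l => l ++ p.2)
      else b.insert (pvDec p.1) p.2) PySem.Dict.empty movies).keys
      = PySem.Set.ofList (movies.map (fun p => pvDec p.1)) := by
    rw [pv_bstep_keys, PySem.Dict.keys_empty, PySem.Set.ofList_eq_foldl]; rfl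
  rw [hbk]
  set S := PySem.List.sorted (PySem.Set.ofList (movies.map (fun p => pvDec p.1))) (fun x => x) false with hS
  have hSnodup : S.Nodup :=
    (PySem.List.sorted_perm _ _ _).nodup_iff.mpr (PySem.Set.nodup_ofList _)
  have hmemS : ∀ k, k ∈ S → k ∈ movies.map (fun p => pvDec p.1) := fun k hk => by
    rw [← PySem.Set.mem_ofList]; exact (PySem.List.sorted_perm _ _ _).mem_iff.mp hk
  -- the initial dict: every decade key mapped to []
  have hitems0 : (List.foldl (fun d i => d.insert i ([] : List String)) (PySem.Dict.empty : PySem.Dict Int (List String)) S).items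
      = S.map (fun i => (i, ([] : List String))) := by
    have := PySem.Dict.items_foldl_insert_fresh (l := S) (k := fun i => i)
      (v := fun _ => ([] : List String)) (d := PySem.Dict.empty)
      (by intro a _; simp [PySem.Dict.contains_empty]) (by simpa using hSnodup)
    simpa using this
  have hkeys0 : (List.foldl (fun d i => d.insert i ([] : List String)) (PySem.Dict.empty : PySem.Dict Int (List String)) S).keys = S := by
    rw [PySem.Dict.keys, hitems0]; simp [Function.comp_def]
  have hgetD0 : ∀ c, (List.foldl (fun d i => d.insert i ([] : List String)) (PySem.Dict.empty : PySem.Dict Int (List String)) S).getD c [] = [] := by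
    intro c
    by_cases hc : c ∈ S
    · exact PySem.Dict.getD_of_mem_items _
        (by rw [hitems0]; exact List.mem_map.mpr ⟨c, hc, rfl⟩) (by rw [hkeys0]; exact hSnodup) []
    · refine PySem.Dict.getD_of_not_contains _ _ ?_
      rw [← Bool.not_eq_true, PySem.Dict.contains_iff_mem_keys, hkeys0]; exact hc
  rw [hkeys0]
  have hKmem : ∀ i ∈ S, i ∈ (List.foldl (fun d i => d.insert i ([] : List String)) (PySem.Dict.empty : PySem.Dict Int (List String)) S).keys := by
    intro i hi; rw [hkeys0]; exact hi
  have houtK : (S.foldl (fun d i => List.foldl (fun d x => if x ≤ i + 9 ∧ x ≥ i then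
      List.foldl (fun d v => d.modify i [] fun l => l ++ [v]) d ((PySem.Dict.ofList movies).getD x [])
      else d) d (PySem.Dict.ofList movies).keys)
      (List.foldl (fun d i => d.insert i ([] : List String)) (PySem.Dict.empty : PySem.Dict Int (List String)) S)).keys = S := by
    rw [pv_outer_keys S _ (fun x => (PySem.Dict.ofList movies).getD x []) _ hKmem, hkeys0]
  rw [PySem.Dict.items_eq_map_keys _ (by rw [houtK]; exact hSnodup) [], houtK]
  apply List.map_congr_left
  intro k hk
  obtain ⟨p0, hp0, hk0⟩ : ∃ p ∈ movies, pvDec p.1 = k := by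
    have := hmemS k hk; simpa using this
  refine Prod.ext rfl ?_
  rw [pv_outer_getD S _ (fun x => (PySem.Dict.ofList movies).getD x []) _ hSnodup hKmem k,
    hgetD0, if_pos hk, List.nil_append]
  rw [pv_bstep_getD, PySem.Dict.getD_empty, List.nil_append]
  rw [hK, List.flatMap_map]
  rw [List.flatMap_congr (g := fun p : Int × List String => if pvDec p.1 = k then p.2 else [])
    (fun p hp => if_congr (pv_dec_mod k p0.1 hk0.symm p.1) (pv_ofList_getD movies hpre hp) rfl)]
  rw [pv_if_flatMap movies (fun p => pvDec p.1 = k) Prod.snd]
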